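-- pv_equiv track=rewrite | github.com/Preocts/aoc2020 | day13/day13_part2.py | check_all_values
-- ===== SOURCE A (Python) =====
-- def check_all_values(timemark: int, bus_list: list, pointer: int = 1) -> bool:
--     if pointer == len(bus_list):
--         return True
--     if bus_list[pointer] == 0:
--         return check_all_values(timemark, bus_list, pointer + 1)
--     if (timemark + pointer) % bus_list[pointer]:
--         return False
--     return check_all_values(timemark, bus_list, pointer + 1)
-- ===== SOURCE B (Python) =====
-- def check_all_values(timemark: int, bus_list: list, pointer: int = 1) -> bool:
--     for i in range(pointer, len(bus_list)):
--         bus = bus_list[i]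
--         if bus == 0:
--             continue
--         if (timemark + i) % bus:
--             return False
--     return True
-- ===== Notes on version B (the rewrite author's own statement) =====
-- stated objective: idiomatic
-- what changed: Replaces A's self-recursion over an explicit pointer with a direct iterative for-loop over range(pointer, len(bus_list)) with continue/early-return, no recursion.
import Mathlib
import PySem

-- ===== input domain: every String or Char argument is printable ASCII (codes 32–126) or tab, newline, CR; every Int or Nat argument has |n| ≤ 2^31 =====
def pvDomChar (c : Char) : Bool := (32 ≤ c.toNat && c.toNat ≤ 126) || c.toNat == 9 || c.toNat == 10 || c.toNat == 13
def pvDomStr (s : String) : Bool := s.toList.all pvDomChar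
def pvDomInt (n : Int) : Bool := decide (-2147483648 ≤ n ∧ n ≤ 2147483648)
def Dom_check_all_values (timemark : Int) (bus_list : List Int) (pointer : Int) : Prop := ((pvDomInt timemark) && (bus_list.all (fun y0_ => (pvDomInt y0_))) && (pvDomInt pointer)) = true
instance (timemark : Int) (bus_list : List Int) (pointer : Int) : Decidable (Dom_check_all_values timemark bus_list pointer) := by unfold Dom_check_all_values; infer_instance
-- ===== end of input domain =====

-- B replaces A's self-recursion with a direct iterative loop over range(pointer, len(bus_list)); same values, no recursion (objective: idiomatic).


-- ===== PORT A =====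
def check_all_values (timemark : Int) (bus_list : List Int) (pointer : Int) : Bool :=
  if pointer = (bus_list.length : Int) then true
  else
    match h : PySem.List.pyGet? bus_list pointer with
    | none => false  -- IndexError in Python: outside Pre_
    | some b =>
      if b = 0 then check_all_values timemark bus_list (pointer + 1)
      else if PySem.Int.mod (timemark + pointer) b ≠ 0 then false
      else check_all_values timemark bus_list (pointer + 1)
termination_by ((bus_list.length : Int) - pointer).toNat
decreasing_by
  all_goals
    have hlt : pointer < (bus_list.length : Int) := by
      by_contra hge
      have hnone : PySem.List.pyGet? bus_list pointer = none := by
        rw [PySem.List.pyGet?_eq_none_iff]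
        intro hin
        exact hge hin.2
      simp [hnone] at h
  all_goals omega

-- ===== PORT B =====
-- the loop body of B: iterates over the (precomputed) index list
def altLoop (timemark : Int) (bus_list : List Int) : List Int → Bool
  | [] => true
  | i :: rest =>
    match PySem.List.pyGet? bus_list i with
    | none => false  -- IndexError in Python: outside Pre_
    | some bus =>
      if bus = 0 then altLoop timemark bus_list rest
      else if PySem.Int.mod (timemark + i) bus ≠ 0 then false
      else altLoop timemark bus_list rest

def check_all_values_alt (timemark : Int) (bus_list : List Int) (pointer : Int) : Bool :=
  altLoop timemark bus_list (PySem.List.pyRange pointer (bus_list.length : Int) 1)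

-- ===== PRECONDITION & SPEC =====
-- Pre_ excludes exactly the pointers on which the Python A raises IndexError (pointer < -len or pointer > len)
def Pre_check_all_values (timemark : Int) (bus_list : List Int) (pointer : Int) : Prop :=
  -(bus_list.length : Int) ≤ pointer ∧ pointer ≤ (bus_list.length : Int)
instance (timemark : Int) (bus_list : List Int) (pointer : Int) : Decidable (Pre_check_all_values timemark bus_list pointer) := by unfold Pre_check_all_values; infer_instance
def pvWitness_check_all_values : Int × List Int × Int := (1068780, [7, 13, 0, 0, 59, 0, 31, 19], 1)

def Spec_check_all_values (timemark : Int) (bus_list : List Int) (pointer : Int) (out : Bool) : Prop := out = check_all_values_alt timemark bus_list pointer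
instance (timemark : Int) (bus_list : List Int) (pointer : Int) (out : Bool) : Decidable (Spec_check_all_values timemark bus_list pointer out) := by unfold Spec_check_all_values; infer_instance

-- ===== CLAIM (what is proved, stated in full; the proofs are below) =====
def Claim_equal_check_all_values : Prop := ∀ (timemark : Int) (bus_list : List Int) (pointer : Int), Dom_check_all_values timemark bus_list pointer → Pre_check_all_values timemark bus_list pointer → Spec_check_all_values timemark bus_list pointer (check_all_values timemark bus_list pointer)

-- ===== LEMMAS AND PROOFS =====

-- the core equivalence, by induction on the distance from pointer to len
theorem check_eq_altLoop (timemark : Int) (bus_list : List Int) (pointer : Int)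
    (hle : pointer ≤ (bus_list.length : Int)) :
    check_all_values timemark bus_list pointer
      = altLoop timemark bus_list (PySem.List.pyRange pointer (bus_list.length : Int) 1) := by
  by_cases heq : pointer = (bus_list.length : Int)
  · rw [check_all_values, if_pos heq,
      PySem.List.pyRange_one_eq_nil (le_of_eq heq.symm), altLoop]
  · have hlt : pointer < (bus_list.length : Int) := lt_of_le_of_ne hle heq
    rw [check_all_values, if_neg heq, PySem.List.pyRange_one_cons hlt, altLoop]
    cases h : PySem.List.pyGet? bus_list pointer with
    | none => simp
    | some b =>
      simp only []
      have ih := check_eq_altLoop timemark bus_list (pointer + 1) (by omega)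
      split_ifs <;> simp [ih]
termination_by ((bus_list.length : Int) - pointer).toNat
decreasing_by omega

-- ===== VERDICT (by name: the statement is the Claim_ definition above) =====
theorem check_all_values_spec : Claim_equal_check_all_values := by
  intro timemark bus_list pointer _ hpre
  exact check_eq_altLoop timemark bus_list pointer hpre.2
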